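-- pv_equiv track=rewrite | github.com/Cho-El/Python-coding-test-practice | 프로그래머스 문제/파이썬/2022 카카오 채용연계형 겨울 테크 인턴십 코딩테스트/3.py | solution
-- ===== SOURCE A (Python) =====
-- def solution(box):
--     maxBox = max(box)
--     if maxBox == box[0]:
--         return box[0]
--     start, end = 0, maxBox
--     answer = maxBox
--     while start <= end:
--         mid = (start + end) // 2
--
--         crit = 0
--         for b in box:
--             crit += b - mid
--             if crit > 0:
--                 start = mid + 1
--                 break
--
--         if crit <= 0: #
--             end = mid - 1
--             answer = min(answer, mid)
--
--         else:
--             start = mid + 1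
--
--     return answer
-- ===== SOURCE B (Python) =====
-- def solution(box):
--     m = max(box)
--     if m < 0:
--         return m
--     ans = pref = 0
--     for k, b in enumerate(box, 1):
--         pref += b
--         ans = max(ans, -(-pref // k))
--     return ans
-- ===== Notes on version B (the rewrite author's own statement) =====
-- stated objective: faster
-- what changed: Replaced the binary search over candidate values (each step rescanning the list) by a single pass that takes the running maximum of the ceiling divisions ceil(prefix_sum_k / k), clamped at 0, with an early return of max(box) when it is negative.
import Mathlib
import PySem

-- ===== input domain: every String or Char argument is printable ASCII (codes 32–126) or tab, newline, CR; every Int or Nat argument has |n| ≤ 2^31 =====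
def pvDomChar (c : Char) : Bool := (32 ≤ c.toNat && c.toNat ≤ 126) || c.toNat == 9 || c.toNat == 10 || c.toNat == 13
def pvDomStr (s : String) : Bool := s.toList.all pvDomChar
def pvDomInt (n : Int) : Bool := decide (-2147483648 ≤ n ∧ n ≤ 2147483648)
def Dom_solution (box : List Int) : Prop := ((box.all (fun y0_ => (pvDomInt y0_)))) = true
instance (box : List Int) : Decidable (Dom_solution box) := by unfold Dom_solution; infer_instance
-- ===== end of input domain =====

-- B replaces A's binary search by a single prefix-sum pass; equal on every nonempty list.

-- ===== PORT A =====
-- inner `for b in box` loop: crit += b - mid, break (returning the positive crit) as soon as crit > 0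
def critLoop (box : List Int) (mid crit : Int) : Int :=
  match box with
  | [] => crit
  | b :: rest =>
    let c := crit + (b - mid)
    if c > 0 then c else critLoop rest mid c

-- the `while start <= end` binary search (terminates because end - start shrinks)
def bsLoop (box : List Int) (start stop answer : Int) : Int :=
  if h : start ≤ stop then
    let mid := PySem.Int.floordiv (start + stop) 2
    let crit := critLoop box mid 0
    if crit ≤ 0 then bsLoop box start (mid - 1) (min answer mid)
    else bsLoop box (mid + 1) stop answer
  else answer
termination_by (stop + 1 - start).toNat
decreasing_by
  · have := PySem.Int.floordiv_two_mid_bounds h; omega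
  · have := PySem.Int.floordiv_two_mid_bounds h; omega

def solution (box : List Int) : Int :=
  match box with
  | [] => 0  -- Python's max([]) raises ValueError; excluded by Pre_solution
  | b0 :: _ =>
    let maxBox := ((PySem.List.max? box (fun x => x)).getD 0)
    if maxBox = b0 then b0
    else bsLoop box 0 maxBox maxBox

-- ===== PORT B =====
-- single pass: ans = max(ans, -(-pref // k)) over enumerate(box, 1)
def altLoop (box : List Int) (k pref ans : Int) : Int :=
  match box with
  | [] => ans
  | b :: rest =>
    let pref' := pref + b
    altLoop rest (k + 1) pref' (max ans (-(PySem.Int.floordiv (-pref') k)))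

def solution_alt (box : List Int) : Int :=
  match box with
  | [] => 0  -- Python's max([]) raises ValueError; excluded by Pre_solution
  | _ :: _ =>
    let m := ((PySem.List.max? box (fun x => x)).getD 0)
    if m < 0 then m
    else altLoop box 1 0 0

-- ===== PRECONDITION & SPEC =====
-- Pre_: Python's max([]) raises ValueError in both A and B, so the empty list is excluded; nothing else is.
def Pre_solution (box : List Int) : Prop := box ≠ []
instance (box : List Int) : Decidable (Pre_solution box) := by unfold Pre_solution; infer_instance
def pvWitness_solution : List Int := ([3, 1, 2])

def Spec_solution (box : List Int) (out : Int) : Prop := out = solution_alt box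
instance (box : List Int) (out : Int) : Decidable (Spec_solution box out) := by unfold Spec_solution; infer_instance

-- ===== CLAIM (what is proved, stated in full; the proofs are below) =====
def Claim_equal_solution : Prop := ∀ (box : List Int), Dom_solution box → Pre_solution box → Spec_solution box (solution box)

-- ===== LEMMAS AND PROOFS =====

-- A's inner loop decides "every nonempty prefix sum fits under len * mid"
theorem critLoop_le_iff (box : List Int) (mid : Int) :
    ∀ c : Int, c ≤ 0 →
      (critLoop box mid c ≤ 0 ↔
        ∀ pre : List Int, pre <+: box → pre ≠ [] → c + pre.sum ≤ pre.length * mid) := by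
  induction box with
  | nil =>
    intro c hc
    simp only [critLoop]
    constructor
    · intro _ pre hpre hne
      rcases List.prefix_nil.mp hpre with rfl
      exact absurd rfl hne
    · intro _; exact hc
  | cons b rest ih =>
    intro c hc
    simp only [critLoop]
    by_cases hpos : c + (b - mid) > 0
    · simp only [if_pos hpos]
      constructor
      · intro h; omega
      · intro h
        have := h [b] ⟨rest, rfl⟩ (by simp)
        simp at this; omega
    · simp only [if_neg hpos]
      rw [ih (c + (b - mid)) (by omega)]
      constructor
      · intro h pre hpre hne
        match pre, hpre with
        | [], _ => exact absurd rfl hne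
        | x :: pre', hpre =>
          obtain ⟨t, ht⟩ := hpre
          have hx : x = b := by injection ht
          have hpre' : pre' <+: rest := ⟨t, by injection ht⟩
          subst hx
          by_cases hne' : pre' = []
          · subst hne'; simp; omega
          · have := h pre' hpre' hne'
            simp only [List.sum_cons, List.length_cons]
            push_cast
            rw [add_mul, one_mul]
            omega
      · intro h pre' hpre' hne'
        have := h (b :: pre') (by exact List.cons_prefix_cons.mpr ⟨rfl, hpre'⟩) (by simp)
        simp only [List.sum_cons, List.length_cons] at this
        push_cast at this ⊢
        rw [add_mul, one_mul] at this
        omega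

-- ceiling division bracket: -(-p // k) ≤ mid ↔ p ≤ k * mid
theorem ceil_le_iff (p k mid : Int) (hk : 0 < k) :
    (-(PySem.Int.floordiv (-p) k) ≤ mid ↔ p ≤ k * mid) := by
  rw [neg_le, PySem.Int.le_floordiv_iff_mul_le hk]
  constructor <;> intro h <;> nlinarith

-- B's loop result is ≤ mid iff ans fits and every nonempty prefix fits
theorem altLoop_le_iff (box : List Int) (mid : Int) :
    ∀ k pref ans : Int, 1 ≤ k →
      (altLoop box k pref ans ≤ mid ↔
        (ans ≤ mid ∧ ∀ pre : List Int, pre <+: box → pre ≠ [] →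
          pref + pre.sum ≤ (k - 1 + pre.length) * mid)) := by
  induction box with
  | nil =>
    intro k pref ans hk
    simp only [altLoop]
    constructor
    · intro h
      refine ⟨h, ?_⟩
      intro pre hpre hne
      rcases List.prefix_nil.mp hpre with rfl
      exact absurd rfl hne
    · exact fun h => h.1
  | cons b rest ih =>
    intro k pref ans hk
    simp only [altLoop]
    rw [ih (k + 1) (pref + b) _ (by omega)]
    rw [max_le_iff, ceil_le_iff _ _ _ (by omega)]
    constructor
    · rintro ⟨⟨hans, hceil⟩, h⟩
      refine ⟨hans, ?_⟩
      intro pre hpre hne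
      match pre, hpre with
      | [], _ => exact absurd rfl hne
      | x :: pre', hpre =>
        obtain ⟨t, ht⟩ := hpre
        have hx : x = b := by injection ht
        have hpre' : pre' <+: rest := ⟨t, by injection ht⟩
        subst hx
        by_cases hne' : pre' = []
        · subst hne'; simp only [List.sum_cons, List.length_cons, List.sum_nil,
            List.length_nil, add_zero]
          push_cast
          nlinarith
        · have := h pre' hpre' hne'
          simp only [List.sum_cons, List.length_cons]
          push_cast at this ⊢
          nlinarith
    · rintro ⟨hans, h⟩
      have h1 : pref + b ≤ k * mid := by
        have := h [b] ⟨rest, rfl⟩ (by simp)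
        simp at this
        nlinarith
      refine ⟨⟨hans, h1⟩, ?_⟩
      intro pre' hpre' hne'
      have := h (b :: pre') (List.cons_prefix_cons.mpr ⟨rfl, hpre'⟩) (by simp)
      simp only [List.sum_cons, List.length_cons] at this
      push_cast at this ⊢
      nlinarith

theorem le_altLoop (box : List Int) : ∀ k pref ans : Int, ans ≤ altLoop box k pref ans := by
  induction box with
  | nil => intro k pref ans; simp [altLoop]
  | cons b rest ih =>
    intro k pref ans
    simp only [altLoop]
    exact le_trans (le_max_left _ _) (ih _ _ _)

-- the binary search computes min answer (max start r) when r characterises feasibility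
theorem bsLoop_eq (box : List Int) (r : Int)
    (hr : ∀ mid : Int, 0 ≤ mid → (critLoop box mid 0 ≤ 0 ↔ r ≤ mid)) :
    ∀ start stop answer : Int, 0 ≤ start →
      bsLoop box start stop answer =
        if max start r ≤ stop then min answer (max start r) else answer := by
  have H : ∀ n : Nat, ∀ start stop answer : Int, (stop + 1 - start).toNat = n → 0 ≤ start →
      bsLoop box start stop answer =
        if max start r ≤ stop then min answer (max start r) else answer := by
    intro n
    induction n using Nat.strong_induction_on with
    | _ n ih =>
      intro start stop answer hn hstart
      rw [bsLoop]
      by_cases h : start ≤ stop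
      · simp only [dif_pos h]
        have hb := PySem.Int.floordiv_two_mid_bounds h
        set mid := PySem.Int.floordiv (start + stop) 2 with hmid
        have hmid0 : 0 ≤ mid := le_trans hstart hb.1
        by_cases hc : critLoop box mid 0 ≤ 0
        · rw [if_pos hc]
          have hrm : r ≤ mid := (hr mid hmid0).mp hc
          rw [ih ((mid - 1) + 1 - start).toNat (by omega) start (mid - 1) (min answer mid) rfl hstart]
          have h1 : max start r ≤ mid := max_le hb.1 hrm
          rw [if_pos (le_trans h1 hb.2)]
          by_cases h2 : max start r ≤ mid - 1
          · rw [if_pos h2, min_assoc, min_comm mid]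
            exact congrArg (min answer) (min_eq_left h1)
          · rw [if_neg h2]
            have : max start r = mid := le_antisymm h1 (by omega)
            rw [this]
        · rw [if_neg hc]
          have hrm : mid + 1 ≤ r := by
            have := hr mid hmid0; omega
          rw [ih (stop + 1 - (mid + 1)).toNat (by omega) (mid + 1) stop answer rfl (by omega)]
          rw [max_eq_right hrm, max_eq_right (by omega : start ≤ r)]
      · simp only [dif_neg h]
        rw [if_neg (by have := le_max_left start r; omega)]
  intro start stop answer hstart
  exact H _ start stop answer rfl hstart

-- a list of elements ≤ m has sum ≤ length * m
theorem sum_le_length_mul (m : Int) : ∀ pre : List Int, (∀ x ∈ pre, x ≤ m) →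
    pre.sum ≤ pre.length * m := by
  intro pre
  induction pre with
  | nil => intro _; simp
  | cons x tl ih =>
    intro h
    simp only [List.sum_cons, List.length_cons]
    push_cast
    have h1 := h x (by simp)
    have h2 := ih (fun y hy => h y (by simp [hy]))
    nlinarith

-- ===== VERDICT (by name: the statement is the Claim_ definition above) =====
theorem solution_spec : Claim_equal_solution := by
  intro box _ hpre
  unfold Spec_solution
  match box with
  | [] => exact absurd rfl hpre
  | b0 :: tl =>
    cases hmx : PySem.List.max? (b0 :: tl) (fun x => x) with
    | none => exact absurd ((PySem.List.max?_eq_none_iff _ _).mp hmx) (by simp)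
    | some m =>
      have hmem : m ∈ b0 :: tl := PySem.List.max?_mem hmx
      have hmax : ∀ y ∈ b0 :: tl, y ≤ m := fun y hy => PySem.List.max?_isMax hmx y hy
      simp only [solution, solution_alt, hmx, Option.getD_some]
      -- r := B's loop value; its two characterisations
      set box := b0 :: tl with hbox
      set r := altLoop box 1 0 0 with hrdef
      have hr0 : (0:Int) ≤ r := le_altLoop box 1 0 0
      have hFeas : ∀ mid : Int, 0 ≤ mid → (critLoop box mid 0 ≤ 0 ↔ r ≤ mid) := by
        intro mid hmid
        rw [critLoop_le_iff box mid 0 le_rfl, hrdef, altLoop_le_iff box mid 1 0 0 le_rfl]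
        constructor
        · intro h
          refine ⟨hmid, ?_⟩
          intro pre hpre hne
          have := h pre hpre hne
          rw [zero_add]
          have : pre.sum ≤ (pre.length : Int) * mid := by omega
          calc pre.sum ≤ (pre.length : Int) * mid := this
            _ = (1 - 1 + (pre.length : Int)) * mid := by ring
        · intro h pre hpre hne
          have := h.2 pre hpre hne
          rw [zero_add] at this
          have heq : (1 - 1 + (pre.length : Int)) * mid = (pre.length : Int) * mid := by ring
          omega
      -- feasibility at m: every prefix is a list of elements ≤ m
      have hFm : critLoop box m 0 ≤ 0 ↔ True := by
        simp only [iff_true]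
        rw [critLoop_le_iff box m 0 le_rfl]
        intro pre hpre hne
        rw [zero_add]
        exact sum_le_length_mul m pre
          (fun x hx => hmax x (hpre.sublist.subset hx))
      -- b0 ≤ r : the one-element prefix [b0]
      have hb0r : b0 ≤ r := by
        have h := (altLoop_le_iff box r 1 0 0 le_rfl).mp (le_of_eq hrdef.symm)
        have := h.2 [b0] ⟨tl, rfl⟩ (by simp)
        simpa using this
      by_cases hmb : m = b0
      · -- A returns b0 directly
        rw [if_pos hmb]
        by_cases hneg : m < 0
        · rw [if_pos hneg]; omega
        · rw [if_neg hneg]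
          have hrm : r ≤ m := (hFeas m (by omega)).mp (hFm.mpr trivial)
          omega
      · rw [if_neg hmb]
        by_cases hneg : m < 0
        · -- the while loop never runs: start = 0 > m = end
          rw [if_pos hneg, bsLoop, dif_neg (by omega)]
        · rw [if_neg hneg]
          have hrm : r ≤ m := (hFeas m (by omega)).mp (hFm.mpr trivial)
          rw [bsLoop_eq box r hFeas 0 m m le_rfl]
          rw [max_eq_right hr0, if_pos hrm, min_eq_right hrm]
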